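-- pv_equiv track=rewrite | github.com/baljeetameo/ameotech-backend-api | app/labs/architecture_blueprint_engine.py | infer_from_description
-- ===== SOURCE A (Python) =====
-- from typing import Dict, List, Any, Optional
--
-- def _norm_str(value: Optional[str]) -> str:
--     if not value:
--       return ""
--     return str(value).strip().lower()
--
-- def infer_from_description(description: str) -> Dict[str, Any]:
--     """
--     Optional helper to adjust some hints from a free-text description.
--     This is still deterministic — just keyword checks.
--     """
--     text = _norm_str(description)
--
--     hints: Dict[str, Any] = {}
--
--     if not text:
--         return hints
--
--     # Product type hints
--     if any(w in text for w in ["saas", "subscription", "b2b", "b2c"]):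
--         hints["product_type"] = "saas"
--     elif any(w in text for w in ["ecommerce", "shop", "cart", "checkout"]):
--         hints["product_type"] = "ecommerce"
--     elif any(w in text for w in ["internal tool", "backoffice", "back-office", "ops team"]):
--         hints["product_type"] = "internal_tool"
--     elif any(w in text for w in ["marketplace", "multi-vendor", "two-sided", "two sided"]):
--         hints["product_type"] = "marketplace"
--
--     # Realtime hints
--     if any(w in text for w in ["chat", "messaging", "websocket", "live update", "live-updates"]):
--         hints["realtime"] = "basic_realtime"
--     if any(w in text for w in ["trading", "realtime bidding", "realtime dashboard", "live feed"]):
--         hints["realtime"] = "heavy_realtime"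
--
--     # Multi-tenancy hints
--     if any(w in text for w in ["multi-tenant", "multi tenant", "multi company", "multi-organisation", "multi-organization"]):
--         hints["multi_tenancy"] = "soft_multi_tenant"
--
--     return hints
-- ===== SOURCE B (Python) =====
-- # Priority-based accumulator: one flat pass over a rule table, keeping the
-- # highest-rank rule per output field, instead of A's if/elif ladder with
-- # dict overwrites.
-- from typing import Dict, List, Any, Optional, Tuple
--
-- def _norm_str(value: Optional[str]) -> str:
--     if not value:
--         return ""
--     return str(value).strip().lower()
--
-- # (keywords, field, value, rank); per field the rule with the highest
-- # matching rank wins: product_type ranks encode A's first-match priority,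
-- # realtime heavy (2) outranks basic (1), replicating A's overwrite.
-- _RULES: List[Tuple[List[str], str, str, int]] = [
--     (["saas", "subscription", "b2b", "b2c"], "product_type", "saas", 4),
--     (["ecommerce", "shop", "cart", "checkout"], "product_type", "ecommerce", 3),
--     (["internal tool", "backoffice", "back-office", "ops team"], "product_type", "internal_tool", 2),
--     (["marketplace", "multi-vendor", "two-sided", "two sided"], "product_type", "marketplace", 1),
--     (["chat", "messaging", "websocket", "live update", "live-updates"], "realtime", "basic_realtime", 1),
--     (["trading", "realtime bidding", "realtime dashboard", "live feed"], "realtime", "heavy_realtime", 2),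
--     (["multi-tenant", "multi tenant", "multi company", "multi-organisation", "multi-organization"], "multi_tenancy", "soft_multi_tenant", 1),
-- ]
--
-- def infer_from_description(description: str) -> Dict[str, Any]:
--     text = _norm_str(description)
--     if not text:
--         return {}
--     best: Dict[str, Tuple[str, int]] = {}
--     for kws, field, value, rank in _RULES:
--         if rank > best.get(field, ("", 0))[1] and any(w in text for w in kws):
--             best[field] = (value, rank)
--     return {f: v for f, (v, _) in best.items()}
-- ===== Notes on version B (the rewrite author's own statement) =====
-- stated objective: alternative
-- what changed: Replaces the hard-coded if/elif ladder with dict overwrites by a single flat pass over a rule table that keeps, per output field, the highest-rank matching rule in an accumulator (ranks encode A's first-match and overwrite priorities), the result dict then projected from the accumulator.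
import Mathlib
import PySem

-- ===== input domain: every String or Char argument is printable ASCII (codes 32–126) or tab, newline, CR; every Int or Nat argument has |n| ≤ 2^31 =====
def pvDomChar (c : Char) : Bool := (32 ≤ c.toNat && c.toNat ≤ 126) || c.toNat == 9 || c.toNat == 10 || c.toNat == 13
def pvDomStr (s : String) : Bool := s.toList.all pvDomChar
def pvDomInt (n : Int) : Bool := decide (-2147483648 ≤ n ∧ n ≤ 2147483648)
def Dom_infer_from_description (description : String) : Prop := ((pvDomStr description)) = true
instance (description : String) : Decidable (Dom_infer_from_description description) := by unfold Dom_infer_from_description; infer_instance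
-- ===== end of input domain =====

-- B replaces A's if/elif ladder by one flat pass over a rule table keeping the
-- highest-rank rule per field (simpler decomposition); return value only.

-- ===== PORT A =====
-- _norm_str: 'not value' on a str is truthy-emptiness
def pvNormStr (value : String) : String :=
  if value = "" then "" else PySem.Str.lower (PySem.Str.strip value)

def infer_from_description (description : String) : List (String × String) :=
  let text := pvNormStr description
  let hints : PySem.Dict String String := PySem.Dict.empty
  if text = "" then hints.items
  else
    let hints :=
      if ["saas", "subscription", "b2b", "b2c"].any (fun w => PySem.Str.isIn w text) then
        hints.insert "product_type" "saas"
      else if ["ecommerce", "shop", "cart", "checkout"].any (fun w => PySem.Str.isIn w text) then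
        hints.insert "product_type" "ecommerce"
      else if ["internal tool", "backoffice", "back-office", "ops team"].any (fun w => PySem.Str.isIn w text) then
        hints.insert "product_type" "internal_tool"
      else if ["marketplace", "multi-vendor", "two-sided", "two sided"].any (fun w => PySem.Str.isIn w text) then
        hints.insert "product_type" "marketplace"
      else hints
    let hints :=
      if ["chat", "messaging", "websocket", "live update", "live-updates"].any (fun w => PySem.Str.isIn w text) then
        hints.insert "realtime" "basic_realtime"
      else hints
    let hints :=
      if ["trading", "realtime bidding", "realtime dashboard", "live feed"].any (fun w => PySem.Str.isIn w text) then
        hints.insert "realtime" "heavy_realtime"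
      else hints
    let hints :=
      if ["multi-tenant", "multi tenant", "multi company", "multi-organisation", "multi-organization"].any (fun w => PySem.Str.isIn w text) then
        hints.insert "multi_tenancy" "soft_multi_tenant"
      else hints
    hints.items

-- ===== PORT B =====
-- flat rule table: (keywords, field, value, rank); highest matching rank wins per field
def pvRules : List (List String × String × String × Int) :=
  [(["saas", "subscription", "b2b", "b2c"], "product_type", "saas", 4),
   (["ecommerce", "shop", "cart", "checkout"], "product_type", "ecommerce", 3),
   (["internal tool", "backoffice", "back-office", "ops team"], "product_type", "internal_tool", 2),
   (["marketplace", "multi-vendor", "two-sided", "two sided"], "product_type", "marketplace", 1),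
   (["chat", "messaging", "websocket", "live update", "live-updates"], "realtime", "basic_realtime", 1),
   (["trading", "realtime bidding", "realtime dashboard", "live feed"], "realtime", "heavy_realtime", 2),
   (["multi-tenant", "multi tenant", "multi company", "multi-organisation", "multi-organization"], "multi_tenancy", "soft_multi_tenant", 1)]

def infer_from_description_alt (description : String) : List (String × String) :=
  let text := pvNormStr description
  if text = "" then []
  else
    let best : PySem.Dict String (String × Int) :=
      pvRules.foldl
        (fun best r =>
          if r.2.2.2 > (best.getD r.2.1 ("", 0)).2 && r.1.any (fun w => PySem.Str.isIn w text) then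
            best.insert r.2.1 (r.2.2.1, r.2.2.2)
          else best)
        PySem.Dict.empty
    best.items.map (fun p => (p.1, p.2.1))

-- ===== PRECONDITION & SPEC =====
def Spec_infer_from_description (description : String) (out : List (String × String)) : Prop := out = infer_from_description_alt description
instance (description : String) (out : List (String × String)) : Decidable (Spec_infer_from_description description out) := by unfold Spec_infer_from_description; infer_instance

-- ===== CLAIM (what is proved, stated in full; the proofs are below) =====
def Claim_equal_infer_from_description : Prop := ∀ (description : String), Dom_infer_from_description description → Spec_infer_from_description description (infer_from_description description)

-- ===== LEMMAS AND PROOFS =====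
-- Proof-only helpers: both bodies depend on the text only through seven
-- group-membership booleans; abstracting them makes the equality decidable.
def pvASide (p1 p2 p3 p4 rb rh mt : Bool) : List (String × String) :=
  let hints : PySem.Dict String String := PySem.Dict.empty
  let hints :=
    if p1 then hints.insert "product_type" "saas"
    else if p2 then hints.insert "product_type" "ecommerce"
    else if p3 then hints.insert "product_type" "internal_tool"
    else if p4 then hints.insert "product_type" "marketplace"
    else hints
  let hints := if rb then hints.insert "realtime" "basic_realtime" else hints
  let hints := if rh then hints.insert "realtime" "heavy_realtime" else hints
  let hints := if mt then hints.insert "multi_tenancy" "soft_multi_tenant" else hints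
  hints.items

def pvBSide (rs : List (Bool × String × String × Int)) : List (String × String) :=
  (rs.foldl
      (fun best r =>
        if r.2.2.2 > (best.getD r.2.1 ("", 0)).2 && r.1 then
          best.insert r.2.1 (r.2.2.1, r.2.2.2)
        else best)
      (PySem.Dict.empty : PySem.Dict String (String × Int))).items.map
    (fun p => (p.1, p.2.1))

theorem pvSides_eq (p1 p2 p3 p4 rb rh mt : Bool) :
    pvASide p1 p2 p3 p4 rb rh mt =
      pvBSide
        [(p1, "product_type", "saas", 4),
         (p2, "product_type", "ecommerce", 3),
         (p3, "product_type", "internal_tool", 2),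
         (p4, "product_type", "marketplace", 1),
         (rb, "realtime", "basic_realtime", 1),
         (rh, "realtime", "heavy_realtime", 2),
         (mt, "multi_tenancy", "soft_multi_tenant", 1)] := by
  revert p1 p2 p3 p4 rb rh mt
  decide

theorem infer_from_description_spec_aux (description : String) :
    infer_from_description description = infer_from_description_alt description := by
  unfold infer_from_description infer_from_description_alt
  by_cases ht : pvNormStr description = ""
  · simp [ht, PySem.Dict.empty]
  · simp only [if_neg ht]
    exact pvSides_eq
      (["saas", "subscription", "b2b", "b2c"].any (fun w => PySem.Str.isIn w (pvNormStr description)))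
      (["ecommerce", "shop", "cart", "checkout"].any (fun w => PySem.Str.isIn w (pvNormStr description)))
      (["internal tool", "backoffice", "back-office", "ops team"].any (fun w => PySem.Str.isIn w (pvNormStr description)))
      (["marketplace", "multi-vendor", "two-sided", "two sided"].any (fun w => PySem.Str.isIn w (pvNormStr description)))
      (["chat", "messaging", "websocket", "live update", "live-updates"].any (fun w => PySem.Str.isIn w (pvNormStr description)))
      (["trading", "realtime bidding", "realtime dashboard", "live feed"].any (fun w => PySem.Str.isIn w (pvNormStr description)))
      (["multi-tenant", "multi tenant", "multi company", "multi-organisation", "multi-organization"].any (fun w => PySem.Str.isIn w (pvNormStr description)))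

-- ===== VERDICT (by name: the statement is the Claim_ definition above) =====
theorem infer_from_description_spec : Claim_equal_infer_from_description := by
  intro d _
  exact (infer_from_description_spec_aux d).symm ▸ rfl
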